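-- pv_equiv track=rewrite | github.com/jackfrost168/adventofcode | 2016/day2.py | part2
-- ===== SOURCE A (Python) =====
-- def part2(instructions):
--     code = ''
--     x, y = 1, 1
--     directions = {'U': (-1, 0), 'R': (0, 1), 'D': (1, 0), 'L': (0, -1)}
--     position = {(0, 2): '1', (1, 1): '2', (1, 2): '3', (1, 3): '4',
--                 (2, 0): '5', (2, 1): '6', (2, 2): '7', (2, 3): '8',
--                 (2, 4): '9', (3, 1): 'A', (3, 2): 'B', (3, 3): 'C', (4, 2): 'D'}
--     for ins in instructions:
--         for s in ins:
--             dir_x, dir_y = directions[s]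
--             if (x + dir_x, y + dir_y) in position.keys():
--                 x += dir_x
--                 y += dir_y
--         button = position[(x, y)]
--         code += button
--     return code
-- ===== SOURCE B (Python) =====
-- def part2(instructions):
--     # complete precomputed button-to-button transition table for the diamond keypad
--     # (off-keypad moves are self-loops)
--     trans = {
--         ('1', 'U'): '1',
--         ('1', 'R'): '1',
--         ('1', 'D'): '3',
--         ('1', 'L'): '1',
--         ('2', 'U'): '2',
--         ('2', 'R'): '3',
--         ('2', 'D'): '6',
--         ('2', 'L'): '2',
--         ('3', 'U'): '1',
--         ('3', 'R'): '4',
--         ('3', 'D'): '7',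
--         ('3', 'L'): '2',
--         ('4', 'U'): '4',
--         ('4', 'R'): '4',
--         ('4', 'D'): '8',
--         ('4', 'L'): '3',
--         ('5', 'U'): '5',
--         ('5', 'R'): '6',
--         ('5', 'D'): '5',
--         ('5', 'L'): '5',
--         ('6', 'U'): '2',
--         ('6', 'R'): '7',
--         ('6', 'D'): 'A',
--         ('6', 'L'): '5',
--         ('7', 'U'): '3',
--         ('7', 'R'): '8',
--         ('7', 'D'): 'B',
--         ('7', 'L'): '6',
--         ('8', 'U'): '4',
--         ('8', 'R'): '9',
--         ('8', 'D'): 'C',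
--         ('8', 'L'): '7',
--         ('9', 'U'): '9',
--         ('9', 'R'): '9',
--         ('9', 'D'): '9',
--         ('9', 'L'): '8',
--         ('A', 'U'): '6',
--         ('A', 'R'): 'B',
--         ('A', 'D'): 'A',
--         ('A', 'L'): 'A',
--         ('B', 'U'): '7',
--         ('B', 'R'): 'C',
--         ('B', 'D'): 'D',
--         ('B', 'L'): 'A',
--         ('C', 'U'): '8',
--         ('C', 'R'): 'C',
--         ('C', 'D'): 'C',
--         ('C', 'L'): 'B',
--         ('D', 'U'): 'B',
--         ('D', 'R'): 'D',
--         ('D', 'D'): 'D',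
--         ('D', 'L'): 'D',
--     }
--     cur = '2'
--     out = []
--     for ins in instructions:
--         for s in ins:
--             cur = trans[(cur, s)]
--         out.append(cur)
--     return ''.join(out)
-- ===== Notes on version B (the rewrite author's own statement) =====
-- stated objective: idiomatic
-- what changed: Replaces runtime coordinate tracking with membership checks against a coordinate dict by a precomputed symbol-to-symbol transition table, keeping only the current button character and doing one dict lookup per instruction character.
import Mathlib
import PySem

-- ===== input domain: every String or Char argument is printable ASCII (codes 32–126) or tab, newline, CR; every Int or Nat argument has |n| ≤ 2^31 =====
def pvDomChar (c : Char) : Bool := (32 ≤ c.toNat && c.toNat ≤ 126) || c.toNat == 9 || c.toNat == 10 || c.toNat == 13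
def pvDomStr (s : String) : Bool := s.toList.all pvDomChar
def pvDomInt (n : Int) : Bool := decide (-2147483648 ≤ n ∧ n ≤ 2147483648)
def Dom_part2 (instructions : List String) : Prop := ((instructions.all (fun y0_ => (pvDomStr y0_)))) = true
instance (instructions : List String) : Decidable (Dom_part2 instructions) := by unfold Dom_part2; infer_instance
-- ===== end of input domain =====

-- B replaces coordinate tracking by a precomputed button-to-button transition table (idiomatic; same cost).

-- ===== PORT A =====
def pvDirections : PySem.Dict Char (Int × Int) :=
  PySem.Dict.ofList [('U', (-1, 0)), ('R', (0, 1)), ('D', (1, 0)), ('L', (0, -1))]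

def pvPosition : PySem.Dict (Int × Int) String :=
  PySem.Dict.ofList [((0, 2), "1"), ((1, 1), "2"), ((1, 2), "3"), ((1, 3), "4"),
    ((2, 0), "5"), ((2, 1), "6"), ((2, 2), "7"), ((2, 3), "8"),
    ((2, 4), "9"), ((3, 1), "A"), ((3, 2), "B"), ((3, 3), "C"), ((4, 2), "D")]

-- one character of the inner loop of A; on a char outside 'URDL' Python raises KeyError
-- (excluded by Pre_part2), the port leaves the state unchanged there
def part2StepA (st : Int × Int) (s : Char) : Int × Int :=
  match pvDirections.get? s with
  | none => st
  | some (dx, dy) =>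
      if pvPosition.contains (st.1 + dx, st.2 + dy) then (st.1 + dx, st.2 + dy) else st

def part2 (instructions : List String) : String :=
  (instructions.foldl
    (fun (acc : String × Int × Int) ins =>
      let st := ins.toList.foldl part2StepA (acc.2.1, acc.2.2)
      (acc.1 ++ pvPosition.getD (st.1, st.2) "", st.1, st.2))
    ("", 1, 1)).1

-- ===== PORT B =====
def pvTrans : PySem.Dict (String × Char) String :=
  PySem.Dict.ofList [
    (("1", 'U'), "1"),
    (("1", 'R'), "1"),
    (("1", 'D'), "3"),
    (("1", 'L'), "1"),
    (("2", 'U'), "2"),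
    (("2", 'R'), "3"),
    (("2", 'D'), "6"),
    (("2", 'L'), "2"),
    (("3", 'U'), "1"),
    (("3", 'R'), "4"),
    (("3", 'D'), "7"),
    (("3", 'L'), "2"),
    (("4", 'U'), "4"),
    (("4", 'R'), "4"),
    (("4", 'D'), "8"),
    (("4", 'L'), "3"),
    (("5", 'U'), "5"),
    (("5", 'R'), "6"),
    (("5", 'D'), "5"),
    (("5", 'L'), "5"),
    (("6", 'U'), "2"),
    (("6", 'R'), "7"),
    (("6", 'D'), "A"),
    (("6", 'L'), "5"),
    (("7", 'U'), "3"),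
    (("7", 'R'), "8"),
    (("7", 'D'), "B"),
    (("7", 'L'), "6"),
    (("8", 'U'), "4"),
    (("8", 'R'), "9"),
    (("8", 'D'), "C"),
    (("8", 'L'), "7"),
    (("9", 'U'), "9"),
    (("9", 'R'), "9"),
    (("9", 'D'), "9"),
    (("9", 'L'), "8"),
    (("A", 'U'), "6"),
    (("A", 'R'), "B"),
    (("A", 'D'), "A"),
    (("A", 'L'), "A"),
    (("B", 'U'), "7"),
    (("B", 'R'), "C"),
    (("B", 'D'), "D"),
    (("B", 'L'), "A"),
    (("C", 'U'), "8"),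
    (("C", 'R'), "C"),
    (("C", 'D'), "C"),
    (("C", 'L'), "B"),
    (("D", 'U'), "B"),
    (("D", 'R'), "D"),
    (("D", 'D'), "D"),
    (("D", 'L'), "D")]

-- one character of the inner loop of B: trans[(cur, s)]; a missing key is a KeyError
-- in Python (only reachable on chars outside 'URDL', excluded by Pre_part2)
def part2StepB (cur : String) (s : Char) : String :=
  match pvTrans.get? (cur, s) with
  | none => cur
  | some b => b

def part2_alt (instructions : List String) : String :=
  let r := instructions.foldl
    (fun (acc : List String × String) ins =>
      let cur := ins.toList.foldl part2StepB acc.2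
      (acc.1 ++ [cur], cur))
    ([], "2")
  String.join r.1

-- ===== PRECONDITION & SPEC =====
-- Pre_ excludes exactly the inputs on which A raises KeyError: any instruction character outside 'URDL'.
def Pre_part2 (instructions : List String) : Prop :=
  (instructions.all fun ins => ins.toList.all fun c => (['U', 'R', 'D', 'L'] : List Char).contains c) = true
instance (instructions : List String) : Decidable (Pre_part2 instructions) := by
  unfold Pre_part2; infer_instance
def pvWitness_part2 : List String := ["ULL", "RRDDD", "LURDL", "UUUUD"]

def Spec_part2 (instructions : List String) (out : String) : Prop := out = part2_alt instructions
instance (instructions : List String) (out : String) : Decidable (Spec_part2 instructions out) := by unfold Spec_part2; infer_instance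

-- ===== CLAIM (what is proved, stated in full; the proofs are below) =====
def Claim_equal_part2 : Prop := ∀ (instructions : List String), Dom_part2 instructions → Pre_part2 instructions → Spec_part2 instructions (part2 instructions)

-- ===== LEMMAS AND PROOFS =====
-- the 13 valid keypad coordinates (the keys of pvPosition)
def pvKeys13 : List (Int × Int) :=
  [(0, 2), (1, 1), (1, 2), (1, 3), (2, 0), (2, 1), (2, 2), (2, 3), (2, 4),
   (3, 1), (3, 2), (3, 3), (4, 2)]

-- one-step bisimulation between A's coordinate state and B's button state, checked on all 13 × 4 cases
set_option maxRecDepth 4000 in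
lemma pv_step (xy : Int × Int) (hxy : xy ∈ pvKeys13) (c : Char)
    (hc : c ∈ (['U', 'R', 'D', 'L'] : List Char)) :
    part2StepA xy c ∈ pvKeys13 ∧
      part2StepB (pvPosition.getD xy "") c = pvPosition.getD (part2StepA xy c) "" := by
  fin_cases hxy <;> fin_cases hc <;> decide

-- inner loop bisimulation
lemma pv_inner (cs : List Char) (xy : Int × Int) (hxy : xy ∈ pvKeys13)
    (hcs : ∀ c ∈ cs, c ∈ (['U', 'R', 'D', 'L'] : List Char)) :
    cs.foldl part2StepA xy ∈ pvKeys13 ∧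
      cs.foldl part2StepB (pvPosition.getD xy "")
        = pvPosition.getD (cs.foldl part2StepA xy) "" := by
  induction cs generalizing xy with
  | nil => exact ⟨hxy, rfl⟩
  | cons c cs ih =>
    have hc : c ∈ (['U', 'R', 'D', 'L'] : List Char) := hcs c (List.mem_cons_self ..)
    obtain ⟨h1, h2⟩ := pv_step xy hxy c hc
    have := ih (part2StepA xy c) h1 (fun c' hc' => hcs c' (List.mem_cons_of_mem _ hc'))
    simpa [List.foldl_cons, h2] using this

-- outer loop bisimulation
lemma pv_outer (inss : List String) (code : List String) (xy : Int × Int)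
    (hxy : xy ∈ pvKeys13)
    (hpre : ∀ ins ∈ inss, ∀ c ∈ ins.toList, c ∈ (['U', 'R', 'D', 'L'] : List Char)) :
    (inss.foldl
      (fun (acc : String × Int × Int) ins =>
        let st := ins.toList.foldl part2StepA (acc.2.1, acc.2.2)
        (acc.1 ++ pvPosition.getD (st.1, st.2) "", st.1, st.2))
      (String.join code, xy.1, xy.2)).1
    = String.join (inss.foldl
        (fun (acc : List String × String) ins =>
          let cur := ins.toList.foldl part2StepB acc.2
          (acc.1 ++ [cur], cur))
        (code, pvPosition.getD xy "")).1 := by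
  induction inss generalizing code xy with
  | nil => simp
  | cons ins inss ih =>
    obtain ⟨h1, h2⟩ := pv_inner ins.toList xy hxy
      (fun c hc => hpre ins (List.mem_cons_self ..) c hc)
    have hjoin : String.join code ++ pvPosition.getD (ins.toList.foldl part2StepA xy) "" =
        String.join (code ++ [pvPosition.getD (ins.toList.foldl part2StepA xy) ""]) := by
      simp [String.join]
    have := ih (code ++ [pvPosition.getD (ins.toList.foldl part2StepA xy) ""])
      (ins.toList.foldl part2StepA xy) h1
      (fun i hi c hc => hpre i (List.mem_cons_of_mem _ hi) c hc)
    simpa [List.foldl_cons, h2, hjoin] using this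

-- ===== VERDICT (by name: the statement is the Claim_ definition above) =====
theorem part2_spec : Claim_equal_part2 := by
  intro instructions _ hpre
  unfold Spec_part2 part2 part2_alt
  have hpre' : ∀ ins ∈ instructions, ∀ c ∈ ins.toList, c ∈ (['U', 'R', 'D', 'L'] : List Char) := by
    intro ins hins c hc
    have h := List.all_eq_true.mp (List.all_eq_true.mp hpre ins hins) c hc
    simpa using h
  have := pv_outer instructions [] (1, 1) (by decide) hpre'
  simpa [String.join] using this
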